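-- pv_equiv track=rewrite | github.com/SarahKohn/PulseOx-FM | plotting/make_all_figures.py | _patterns_pdf_before_png
-- ===== SOURCE A (Python) =====
-- from typing import Iterable
--
-- def _patterns_pdf_before_png(patterns: Iterable[str]) -> list[str]:
--     """For each *.png glob, search the corresponding *.pdf first (vector masters for manuscript compositing)."""
--     ordered: list[str] = []
--     seen: set[str] = set()
--     for raw in patterns:
--         p = str(raw).replace("\\", "/")
--         if p.lower().endswith(".png"):
--             pdf_pat = p[:-4] + ".pdf"
--             if pdf_pat not in seen:
--                 seen.add(pdf_pat)
--                 ordered.append(pdf_pat)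
--         if p not in seen:
--             seen.add(p)
--             ordered.append(p)
--     return ordered
-- ===== SOURCE B (Python) =====
-- def _patterns_pdf_before_png(patterns):
--     """Right-fold rewrite: walk the normalized patterns back-to-front; at each step prepend the
--     head's candidate block (pdf twin first) and drop later occurrences from the already-built
--     suffix result by filtering — no seen-set, dedup falls out of the filter."""
--     pats = [str(raw).replace("\\", "/") for raw in patterns]
--     out: list[str] = []
--     for p in reversed(pats):
--         head = [p[:-4] + ".pdf", p] if p.lower().endswith(".png") else [p]
--         out = head + [x for x in out if x not in head]
--     return out
-- ===== Notes on version B (the rewrite author's own statement) =====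
-- stated objective: alternative
-- what changed: Replaces A's forward pass that appends to an ordered list guarded by a seen-set with a backwards right-fold that carries no set: each step prepends the head's candidate block (pdf twin first) and filters already-collected later occurrences out of the suffix result.
import Mathlib
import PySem

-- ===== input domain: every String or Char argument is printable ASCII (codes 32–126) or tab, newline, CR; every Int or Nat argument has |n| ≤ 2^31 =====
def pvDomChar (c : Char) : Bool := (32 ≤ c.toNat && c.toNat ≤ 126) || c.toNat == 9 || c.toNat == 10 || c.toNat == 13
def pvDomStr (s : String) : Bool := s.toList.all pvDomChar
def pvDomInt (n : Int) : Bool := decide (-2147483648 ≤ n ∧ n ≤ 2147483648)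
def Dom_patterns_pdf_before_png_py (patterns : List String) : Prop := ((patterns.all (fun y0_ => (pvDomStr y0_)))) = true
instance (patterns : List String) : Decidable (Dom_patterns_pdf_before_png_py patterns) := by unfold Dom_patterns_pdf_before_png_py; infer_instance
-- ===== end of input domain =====

-- B replaces A's forward pass (ordered list + seen set) by a backwards right-fold with no set:
-- each step prepends the head's candidate block and filters it out of the suffix result; objective: alternative.
-- ===== PORT A =====
-- shared string helpers (identical expressions in both Pythons): p = str(raw).replace("\\","/"),
-- p.lower().endswith(".png"), p[:-4] + ".pdf"
def pvNorm (raw : String) : String := PySem.Str.replace raw "\\" "/"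
def pvIsPng (p : String) : Bool := PySem.Str.endswith (PySem.Str.lower p) ".png"
def pvPdfOf (p : String) : String := PySem.Str.slice p none (some (-4)) ++ ".pdf"

def patterns_pdf_before_png_py (patterns : List String) : List String :=
  (patterns.foldl (fun st raw =>
      let p := pvNorm raw
      let st :=
        if pvIsPng p then
          let pdf := pvPdfOf p
          if PySem.Set.contains st.2 pdf then st
          else (st.1 ++ [pdf], PySem.Set.add st.2 pdf)
        else st
      if PySem.Set.contains st.2 p then st
      else (st.1 ++ [p], PySem.Set.add st.2 p))
    ([], (PySem.Set.empty : PySem.Set String))).1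

-- ===== PORT B =====
-- 'for p in reversed(pats): out = head + [x for x in out if x not in head]' is a right fold over pats
def patterns_pdf_before_png_py_alt (patterns : List String) : List String :=
  let pats := patterns.map pvNorm
  pats.reverse.foldl (fun out p =>
      let head := if pvIsPng p then [pvPdfOf p, p] else [p]
      head ++ out.filter (fun x => !(head.contains x))) []

-- ===== PRECONDITION & SPEC =====
def Spec_patterns_pdf_before_png_py (patterns : List String) (out : List String) : Prop := out = patterns_pdf_before_png_py_alt patterns
instance (patterns : List String) (out : List String) : Decidable (Spec_patterns_pdf_before_png_py patterns out) := by unfold Spec_patterns_pdf_before_png_py; infer_instance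

-- ===== CLAIM (what is proved, stated in full; the proofs are below) =====
def Claim_equal_patterns_pdf_before_png_py : Prop := ∀ (patterns : List String), Dom_patterns_pdf_before_png_py patterns → Spec_patterns_pdf_before_png_py patterns (patterns_pdf_before_png_py patterns)

-- ===== LEMMAS AND PROOFS =====

-- expansion of one (already normalized) pattern: the candidate block both programs emit for it
def pvExpand1 (p : String) : List String :=
  if pvIsPng p then [pvPdfOf p, p] else [p]

-- A's loop keeps ordered = seen (as element lists) and acts as Set.add over the expansion
lemma pvAFoldl (l : List String) (s : PySem.Set String) :
    l.foldl (fun st raw =>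
      let p := pvNorm raw
      let st :=
        if pvIsPng p then
          let pdf := pvPdfOf p
          if PySem.Set.contains st.2 pdf then st
          else (st.1 ++ [pdf], PySem.Set.add st.2 pdf)
        else st
      if PySem.Set.contains st.2 p then st
      else (st.1 ++ [p], PySem.Set.add st.2 p)) (s, s)
    = (((l.map pvNorm).flatMap pvExpand1).foldl PySem.Set.add s,
       ((l.map pvNorm).flatMap pvExpand1).foldl PySem.Set.add s) := by
  induction l generalizing s with
  | nil => simp
  | cons x xs ih =>
    have hstep : ∀ (t : PySem.Set String) (v : String),
        (if PySem.Set.contains t v then (t, t)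
         else (t ++ [v], PySem.Set.add t v)) = (PySem.Set.add t v, PySem.Set.add t v) := by
      intro t v
      by_cases h : v ∈ t <;> simp [PySem.Set.add, PySem.Set.contains, h]
    simp only [List.foldl_cons, List.map_cons, List.flatMap_cons, List.foldl_append, pvExpand1]
    by_cases h : pvIsPng (pvNorm x)
    · simp only [h, if_true]
      rw [hstep, hstep]
      exact ih _
    · simp only [h, Bool.false_eq_true, if_false, List.foldl_cons, List.foldl_nil]
      rw [hstep]
      exact ih _

-- folding Set.add from an arbitrary start s = dedup of ys, minus what s already holds
lemma pvAddFoldl (ys : List String) (s : List String) :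
    ys.foldl PySem.Set.add s
      = s ++ (PySem.List.dedup ys).filter (fun y => !(s.contains y)) := by
  induction ys generalizing s with
  | nil => simp [PySem.List.dedup, PySem.Set.ofList, PySem.Set.empty]
  | cons y ys ih =>
    have hd : PySem.List.dedup (y :: ys)
        = [y] ++ (PySem.List.dedup ys).filter (fun z => !([y].contains z)) := by
      have : PySem.List.dedup (y :: ys) = ys.foldl PySem.Set.add [y] := by
        simp [PySem.List.dedup, PySem.Set.ofList, PySem.Set.empty, PySem.Set.add,
          PySem.Set.contains]
      rw [this, ih]
    rw [List.foldl_cons, ih, hd]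
    by_cases h : y ∈ s
    · have hadd : PySem.Set.add s y = s := by
        simp [PySem.Set.add, PySem.Set.contains, h]
      rw [hadd]
      simp only [List.filter_append, List.filter_filter]
      congr 1
      simp only [List.filter_cons, List.filter_nil]
      rw [if_neg (by simp [h])]
      simp only [List.nil_append]
      apply List.filter_congr
      intro z _
      by_cases hz : z ∈ s
      · simp [hz]
      · have hzy : z ≠ y := fun e => hz (e ▸ h)
        simp [hz, hzy]
    · have hadd : PySem.Set.add s y = s ++ [y] := by
        simp [PySem.Set.add, PySem.Set.contains, h]
      rw [hadd]
      simp only [List.filter_append, List.filter_filter, List.append_assoc]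
      congr 1
      simp only [List.filter_cons, List.filter_nil]
      rw [if_pos (by simp [h])]
      congr 1
      apply List.filter_congr
      intro z _
      by_cases hz : z ∈ s
      · simp [hz]
      · by_cases hy : z = y <;> simp [hz, hy]

-- the pdf twin of a *.png pattern is never the pattern itself (last char 'f' vs 'g'/'G')
lemma pvPdfNe (p : String) (h : pvIsPng p = true) : ¬ (p = pvPdfOf p) := by
  intro heq
  have hsfx : ('.' :: 'p' :: 'n' :: ['g']) <:+ (List.map PySem.Chars.lowerChar p.toList) := by
    have := h
    simp only [pvIsPng, PySem.Str.endswith, PySem.Str.lower, PySem.Chars.endswith,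
      PySem.Chars.lower] at this
    rw [String.toList_ofList] at this
    exact List.isSuffixOf_iff_suffix.mp (by simpa using this)
  obtain ⟨t, ht⟩ := hsfx
  have hlist : p.toList = (PySem.Str.slice p none (some (-4))).toList ++ ('.' :: 'p' :: 'd' :: ['f']) := by
    conv_lhs => rw [heq]
    simp [pvPdfOf]
  have hmap : List.map PySem.Chars.lowerChar p.toList
      = List.map PySem.Chars.lowerChar (PySem.Str.slice p none (some (-4))).toList
        ++ ('.' :: 'p' :: 'd' :: ['f']) := by
    rw [hlist, List.map_append]
    congr 1
  rw [hmap] at ht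
  have := congrArg List.getLast? ht
  simp [List.getLast?_append] at this

-- B's step = dedup of (candidate block ++ rest), given the block is duplicate-free
lemma pvDedupBlock (p : String) (rest : List String) :
    PySem.List.dedup (pvExpand1 p ++ rest)
      = pvExpand1 p ++ (PySem.List.dedup rest).filter (fun x => !((pvExpand1 p).contains x)) := by
  have h1 : PySem.List.dedup (pvExpand1 p ++ rest)
      = (pvExpand1 p).foldl PySem.Set.add [] ++
        (PySem.List.dedup rest).filter
          (fun x => !(((pvExpand1 p).foldl PySem.Set.add []).contains x)) := by
    have : PySem.List.dedup (pvExpand1 p ++ rest)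
        = rest.foldl PySem.Set.add ((pvExpand1 p).foldl PySem.Set.add []) := by
      simp [PySem.List.dedup, PySem.Set.ofList, PySem.Set.empty, List.foldl_append]
    rw [this, pvAddFoldl]
    rfl
  have h2 : (pvExpand1 p).foldl PySem.Set.add [] = pvExpand1 p := by
    unfold pvExpand1
    by_cases h : pvIsPng p
    · have hne : ¬ (p = pvPdfOf p) := pvPdfNe p h
      simp [h, PySem.Set.add, PySem.Set.contains, hne]
    · simp [h, PySem.Set.add, PySem.Set.contains]
  rw [h1, h2]
  rfl

-- B's whole fold computes dedup of the flat candidate list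
lemma pvBFoldr (ps : List String) :
    ps.foldr (fun p out =>
        (if pvIsPng p then [pvPdfOf p, p] else [p]) ++
          out.filter (fun x => !((if pvIsPng p then [pvPdfOf p, p] else [p]).contains x))) []
      = PySem.List.dedup (ps.flatMap pvExpand1) := by
  induction ps with
  | nil => simp [PySem.List.dedup, PySem.Set.ofList, PySem.Set.empty]
  | cons p ps ih =>
    rw [List.foldr_cons, ih, List.flatMap_cons, pvDedupBlock]
    rfl

-- ===== VERDICT (by name: the statement is the Claim_ definition above) =====
theorem patterns_pdf_before_png_py_spec : Claim_equal_patterns_pdf_before_png_py := by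
  intro patterns _
  unfold Spec_patterns_pdf_before_png_py patterns_pdf_before_png_py patterns_pdf_before_png_py_alt
  rw [show (([], (PySem.Set.empty : PySem.Set String)) : List String × PySem.Set String)
      = ((PySem.Set.empty : PySem.Set String), (PySem.Set.empty : PySem.Set String)) from rfl]
  rw [pvAFoldl]
  simp only [List.foldl_reverse]
  rw [show (fun (p : String) (out : List String) =>
        (let head := if pvIsPng p then [pvPdfOf p, p] else [p]
         head ++ out.filter (fun x => !(head.contains x)))) = (fun p out =>
        (if pvIsPng p then [pvPdfOf p, p] else [p]) ++
          out.filter (fun x => !((if pvIsPng p then [pvPdfOf p, p] else [p]).contains x))) from rfl]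
  rw [pvBFoldr]
  rw [pvAddFoldl]
  simp [PySem.Set.empty]
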